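-- pv_equiv track=rewrite | github.com/ESA-VirES/VirES-Server | vires/vires/hapi/views/landing_page.py | _group_datasets_by_type
-- ===== SOURCE A (Python) =====
-- def _group_datasets_by_type(dataset_infos):
--     groups = {}
--     order = {}
--     for dataset, info in dataset_infos.items():
--         type_ = info["x_datasetType"]
--         order[type_] = info["x_dataTypeOrder"]
--         group = groups.get(type_)
--         if not group:
--             groups[type_] = group = {}
--         group[dataset] = info
--     return _order_groups(groups, order)
--
-- def _order_groups(groups, order):
--     return dict(sorted(groups.items(), key=lambda item: (order[item[0]], item[0])))
-- ===== SOURCE B (Python) =====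
-- def _group_datasets_by_type(dataset_infos):
--     order = {
--         info["x_datasetType"]: info["x_dataTypeOrder"]
--         for info in dataset_infos.values()
--     }
--     types = sorted(order, key=lambda type_: (order[type_], type_))
--     return {
--         type_: {
--             dataset: info
--             for dataset, info in dataset_infos.items()
--             if info["x_datasetType"] == type_
--         }
--         for type_ in types
--     }
-- ===== Notes on version B (the rewrite author's own statement) =====
-- stated objective: simpler
-- what changed: A buckets entries into per-type dicts in one pass and then sorts the bucket items; B first derives the type->order map and the sorted type list, then builds each group by a direct filtering comprehension over the input per type, replacing the mutate-buckets-then-sort decomposition with comprehensions.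
import Mathlib
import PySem

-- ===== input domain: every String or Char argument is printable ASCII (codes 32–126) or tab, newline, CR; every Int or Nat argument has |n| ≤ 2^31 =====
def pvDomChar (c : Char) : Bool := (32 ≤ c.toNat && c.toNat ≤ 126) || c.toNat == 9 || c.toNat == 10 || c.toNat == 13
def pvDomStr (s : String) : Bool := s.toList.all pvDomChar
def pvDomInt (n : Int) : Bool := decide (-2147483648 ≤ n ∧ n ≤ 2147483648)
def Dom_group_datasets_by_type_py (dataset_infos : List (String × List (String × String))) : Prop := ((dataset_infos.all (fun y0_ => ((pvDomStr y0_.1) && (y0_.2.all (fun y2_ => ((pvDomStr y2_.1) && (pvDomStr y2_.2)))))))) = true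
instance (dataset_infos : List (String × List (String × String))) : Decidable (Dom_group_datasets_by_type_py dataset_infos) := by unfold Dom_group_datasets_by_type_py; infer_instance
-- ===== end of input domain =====

-- B replaces A's mutate-buckets-then-sort decomposition by "derive the sorted type list, then build each
-- group with a filtering comprehension per type"; same return value, no speed claim (objective: simpler).


-- info[k] for the two mandatory keys; total form of the dict lookup (Pre_ guarantees the key is present)
def pvInfoGet (info : List (String × String)) (k : String) : String :=
  (PySem.Dict.mk info).getD k ""

-- ===== PORT A =====
-- one iteration of A's 'for dataset, info in dataset_infos.items()' loop over the state (groups, order)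
def pvAStep
    (st : PySem.Dict String (PySem.Dict String (List (String × String))) × PySem.Dict String String)
    (p : String × List (String × String)) :
    PySem.Dict String (PySem.Dict String (List (String × String))) × PySem.Dict String String :=
  let t := pvInfoGet p.2 "x_datasetType"
  let order := st.2.insert t (pvInfoGet p.2 "x_dataTypeOrder")
  let group :=
    match PySem.Dict.get? st.1 t with
    | none => PySem.Dict.empty
    | some g => if g.size == 0 then PySem.Dict.empty else g   -- 'if not group'
  (st.1.insert t (group.insert p.1 p.2), order)

def group_datasets_by_type_py (dataset_infos : List (String × List (String × String))) : List (String × List (String × List (String × String))) :=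
  let st := dataset_infos.foldl pvAStep (PySem.Dict.empty, PySem.Dict.empty)
  -- _order_groups: dict(sorted(groups.items(), key=lambda item: (order[item[0]], item[0])))
  (PySem.Dict.ofList
    (PySem.List.sorted2 st.1.items (fun it => st.2.getD it.1 "") (fun it => it.1) false)).items.map
    (fun q => (q.1, q.2.items))

-- ===== PORT B =====
-- order-dict comprehension step: order[info["x_datasetType"]] = info["x_dataTypeOrder"]
def pvOStep (o : PySem.Dict String String) (p : String × List (String × String)) : PySem.Dict String String :=
  o.insert (pvInfoGet p.2 "x_datasetType") (pvInfoGet p.2 "x_dataTypeOrder")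

-- inner comprehension: {dataset: info for dataset, info in dataset_infos.items() if info["x_datasetType"] == t}
def pvBGroup (dataset_infos : List (String × List (String × String))) (t : String) :
    PySem.Dict String (List (String × String)) :=
  dataset_infos.foldl
    (fun d p => if pvInfoGet p.2 "x_datasetType" == t then d.insert p.1 p.2 else d)
    PySem.Dict.empty

def group_datasets_by_type_py_alt (dataset_infos : List (String × List (String × String))) : List (String × List (String × List (String × String))) :=
  let order := dataset_infos.foldl pvOStep PySem.Dict.empty
  let types := PySem.List.sorted2 order.keys (fun t => order.getD t "") (fun t => t) false
  (PySem.Dict.ofList (types.map (fun t => (t, (pvBGroup dataset_infos t).items)))).items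

-- ===== PRECONDITION & SPEC =====
-- Pre_ excludes exactly the inputs on which the Python raises KeyError: some info dict lacking
-- "x_datasetType" or "x_dataTypeOrder" (both A and B subscript every info with both keys).
def Pre_group_datasets_by_type_py (dataset_infos : List (String × List (String × String))) : Prop :=
  ∀ p ∈ dataset_infos,
    (PySem.Dict.mk p.2).contains "x_datasetType" = true ∧
    (PySem.Dict.mk p.2).contains "x_dataTypeOrder" = true
instance (dataset_infos : List (String × List (String × String))) : Decidable (Pre_group_datasets_by_type_py dataset_infos) := by unfold Pre_group_datasets_by_type_py; infer_instance

def pvWitness_group_datasets_by_type_py : (List (String × List (String × String))) :=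
  [("d1", [("x_datasetType", "t1"), ("x_dataTypeOrder", "2")]),
   ("d2", [("x_datasetType", "t0"), ("x_dataTypeOrder", "1")])]

def Spec_group_datasets_by_type_py (dataset_infos : List (String × List (String × String))) (out : List (String × List (String × List (String × String)))) : Prop := out = group_datasets_by_type_py_alt dataset_infos
instance (dataset_infos : List (String × List (String × String))) (out : List (String × List (String × List (String × String)))) : Decidable (Spec_group_datasets_by_type_py dataset_infos out) := by unfold Spec_group_datasets_by_type_py; infer_instance

-- ===== CLAIM (what is proved, stated in full; the proofs are below) =====
def Claim_equal_group_datasets_by_type_py : Prop := ∀ (dataset_infos : List (String × List (String × String))), Dom_group_datasets_by_type_py dataset_infos → Pre_group_datasets_by_type_py dataset_infos → Spec_group_datasets_by_type_py dataset_infos (group_datasets_by_type_py dataset_infos)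

-- ===== LEMMAS AND PROOFS =====

theorem pv_size_ne_zero_of_contains {κ ν : Type} [BEq κ] [LawfulBEq κ]
    (d : PySem.Dict κ ν) (k : κ) (h : d.contains k = true) : d.size ≠ 0 := by
  
  rw [PySem.Dict.contains_eq_isSome_get?] at h
  cases hg : d.get? k with
  | none => rw [hg] at h; simp at h
  | some v =>
    have hm := PySem.Dict.mem_items_of_get?_eq_some d hg
    have : d.items ≠ [] := List.ne_nil_of_mem hm
    simpa [PySem.Dict.size, List.length_eq_zero_iff] using this

theorem pv_insert_size_ne_zero {κ ν : Type} [BEq κ] [LawfulBEq κ]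
    (d : PySem.Dict κ ν) (k : κ) (v : ν) : (d.insert k v).size ≠ 0 := by
  
  by_cases h : d.contains k = true
  · rw [PySem.Dict.size_insert]
    simp only [h, if_true]
    exact pv_size_ne_zero_of_contains d k h
  · rw [PySem.Dict.size_insert]
    simp only [h]
    simp

-- A's order component is exactly B's order fold
theorem pv_snd_eq (xs : List (String × List (String × String)))
    (g : PySem.Dict String (PySem.Dict String (List (String × String))))
    (o : PySem.Dict String String) :
    (xs.foldl pvAStep (g, o)).2 = xs.foldl pvOStep o := by
  
  induction xs generalizing g o with
  | nil => rfl
  | cons p rest ih => simp only [List.foldl_cons, pvAStep, pvOStep]; exact ih _ _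

-- A's groups dict and B's order dict grow their key lists identically
theorem pv_keys_eq (xs : List (String × List (String × String)))
    (g : PySem.Dict String (PySem.Dict String (List (String × String))))
    (o : PySem.Dict String String) (o' : PySem.Dict String String)
    (h : g.keys = o'.keys) :
    (xs.foldl pvAStep (g, o)).1.keys = (xs.foldl pvOStep o').keys := by
  
  induction xs generalizing g o o' with
  | nil => simpa using h
  | cons p rest ih =>
    simp only [List.foldl_cons, pvAStep, pvOStep]
    apply ih
    by_cases hc : (pvInfoGet p.2 "x_datasetType") ∈ g.keys
    · have hg : g.contains (pvInfoGet p.2 "x_datasetType") = true := by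
        rw [PySem.Dict.contains_eq_decide_mem_keys]; simpa using hc
      have ho : o'.contains (pvInfoGet p.2 "x_datasetType") = true := by
        rw [PySem.Dict.contains_eq_decide_mem_keys]; rw [← h]; simpa using hc
      rw [PySem.Dict.keys_insert_of_contains _ _ hg, PySem.Dict.keys_insert_of_contains _ _ ho]
      exact h
    · have hg : g.contains (pvInfoGet p.2 "x_datasetType") = false := by
        rw [PySem.Dict.contains_eq_decide_mem_keys]; simpa using hc
      have ho : o'.contains (pvInfoGet p.2 "x_datasetType") = false := by
        rw [PySem.Dict.contains_eq_decide_mem_keys]; rw [← h]; simpa using hc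
      rw [PySem.Dict.keys_insert_of_not_contains _ _ hg, PySem.Dict.keys_insert_of_not_contains _ _ ho, h]

-- each bucket of A equals B's filtering fold for that type
theorem pv_getD_eq (xs : List (String × List (String × String)))
    (g : PySem.Dict String (PySem.Dict String (List (String × String))))
    (o : PySem.Dict String String)
    (hne : ∀ q ∈ g.items, q.2.size ≠ 0) (t : String) :
    ((xs.foldl pvAStep (g, o)).1).getD t PySem.Dict.empty =
      xs.foldl
        (fun d p => if pvInfoGet p.2 "x_datasetType" == t then d.insert p.1 p.2 else d)
        (g.getD t PySem.Dict.empty) := by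
  
  induction xs generalizing g o with
  | nil => rfl
  | cons p rest ih =>
    simp only [List.foldl_cons, pvAStep]
    have hgrp : (match PySem.Dict.get? g (pvInfoGet p.2 "x_datasetType") with
        | none => PySem.Dict.empty
        | some gr => if gr.size == 0 then PySem.Dict.empty else gr) =
        g.getD (pvInfoGet p.2 "x_datasetType") PySem.Dict.empty := by
      cases hg : PySem.Dict.get? g (pvInfoGet p.2 "x_datasetType") with
      | none => simp [PySem.Dict.getD, hg]
      | some gr =>
        have hm := PySem.Dict.mem_items_of_get?_eq_some g hg
        have hsz := hne _ hm
        simp only [PySem.Dict.getD, hg, Option.getD_some]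
        simp [hsz]
    rw [hgrp]
    rw [ih]
    · congr 1
      rw [PySem.Dict.getD_insert]
      by_cases ht : t = pvInfoGet p.2 "x_datasetType"
      · simp [ht]
      · have : (pvInfoGet p.2 "x_datasetType" == t) = false := by
          simp; exact fun hh => ht hh.symm
        simp [ht, this]
    · intro q hq
      rcases (PySem.Dict.mem_items_insert _ _ _ _).1 hq with hq1 | hq2
      · subst hq1; exact pv_insert_size_ne_zero _ _ _
      · exact hne _ hq2.1

theorem pv_insertBy_map {α β : Type} (f : α → β) (before : β → β → Bool) (x : α) (l : List α) :
    PySem.List.insertBy before (f x) (l.map f) =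
      (PySem.List.insertBy (fun a b => before (f a) (f b)) x l).map f := by
  
  induction l with
  | nil => simp [PySem.List.insertBy]
  | cons y ys ih =>
    simp only [List.map_cons, PySem.List.insertBy]
    by_cases h : before (f x) (f y) = true
    · simp [h]
    · simp only [h]
      simp only [Bool.false_eq_true, if_false, List.map_cons]
      rw [ih]

theorem pv_sorted2_map {α β κ₁ κ₂ : Type} [LT κ₁] [DecidableLT κ₁] [LT κ₂] [DecidableLT κ₂]
    (f : α → β) (l : List α) (k1 : β → κ₁) (k2 : β → κ₂) :
    PySem.List.sorted2 (l.map f) k1 k2 false =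
      (PySem.List.sorted2 l (fun a => k1 (f a)) (fun a => k2 (f a)) false).map f := by
  
  simp only [PySem.List.sorted2, if_neg (by simp : ¬ (false = true))]
  rw [List.foldl_map]
  have key : ∀ (acc : List α),
      (l.foldl (fun acc x => PySem.List.insertBy
          (fun a b => decide (k1 a < k1 b) || !decide (k1 b < k1 a) && decide (k2 a < k2 b)) (f x) acc)
        (acc.map f)) =
      (l.foldl (fun acc x => PySem.List.insertBy
          (fun a b => decide (k1 (f a) < k1 (f b)) || !decide (k1 (f b) < k1 (f a)) && decide (k2 (f a) < k2 (f b))) x acc)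
        acc).map f := by
    induction l with
    | nil => intro acc; simp
    | cons y ys ih =>
      intro acc
      simp only [List.foldl_cons]
      rw [pv_insertBy_map]
      exact ih _
  simpa using key []

theorem pv_ofList_items {κ ν : Type} [BEq κ] [LawfulBEq κ]
    (L : List (κ × ν)) (h : (L.map Prod.fst).Nodup) :
    (PySem.Dict.ofList L).items = L := by
  
  have := PySem.Dict.items_foldl_insert_fresh L Prod.fst Prod.snd PySem.Dict.empty
    (fun a _ => PySem.Dict.contains_empty a.1) h
  simpa [PySem.Dict.ofList, PySem.Dict.update, PySem.Dict.empty] using this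

-- ===== VERDICT (by name: the statement is the Claim_ definition above) =====
theorem group_datasets_by_type_py_spec : Claim_equal_group_datasets_by_type_py := by
  unfold Claim_equal_group_datasets_by_type_py
  intro xs _ _
  unfold Spec_group_datasets_by_type_py
  simp only [group_datasets_by_type_py, group_datasets_by_type_py_alt]
  -- names for the two accumulated dicts
  have hsnd := pv_snd_eq xs PySem.Dict.empty PySem.Dict.empty
  have hndOB : (xs.foldl pvOStep PySem.Dict.empty).keys.Nodup := by
    exact PySem.Dict.nodup_keys_foldl_insert_key xs
      (fun p => pvInfoGet p.2 "x_datasetType") (fun _ p => pvInfoGet p.2 "x_dataTypeOrder")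
      PySem.Dict.empty (by simp [PySem.Dict.empty, PySem.Dict.keys])
  have hkeys : ((xs.foldl pvAStep (PySem.Dict.empty, PySem.Dict.empty)).1).keys =
      (xs.foldl pvOStep PySem.Dict.empty).keys := pv_keys_eq xs _ _ _ rfl
  have hndG : ((xs.foldl pvAStep (PySem.Dict.empty, PySem.Dict.empty)).1).keys.Nodup := by
    rw [hkeys]; exact hndOB
  have hval : ∀ t, ((xs.foldl pvAStep (PySem.Dict.empty, PySem.Dict.empty)).1).getD t PySem.Dict.empty =
      pvBGroup xs t := by
    intro t
    rw [pv_getD_eq xs _ _ (by intro q hq; simp [PySem.Dict.empty] at hq) t]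
    simp [pvBGroup, PySem.Dict.getD_empty]
  rw [hsnd]
  rw [PySem.Dict.items_eq_map_keys _ hndG PySem.Dict.empty]
  rw [pv_sorted2_map]
  simp only []
  rw [hkeys]
  have hperm := PySem.List.sorted2_perm (xs.foldl pvOStep PySem.Dict.empty).keys
    (fun t => (xs.foldl pvOStep PySem.Dict.empty).getD t "") (fun t => t) false
  have hndT : (PySem.List.sorted2 (xs.foldl pvOStep PySem.Dict.empty).keys
      (fun t => (xs.foldl pvOStep PySem.Dict.empty).getD t "") (fun t => t) false).Nodup :=
    hperm.nodup_iff.mpr hndOB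
  rw [pv_ofList_items _ (by simpa [List.map_map, Function.comp_def] using hndT)]
  rw [pv_ofList_items _ (by simpa [List.map_map, Function.comp_def] using hndT)]
  simp only [List.map_map]
  apply List.map_congr_left
  intro t ht
  simp [Function.comp, hval]
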